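-- pv_equiv track=rewrite | github.com/5a6io/BaekjoonProgrammers | 백준/Gold/11444. 피보나치 수 6/피보나치 수 6.py | squared
-- ===== SOURCE A (Python) =====
-- def multiply(a, b):
--     n = len(a)
--     c = [[0 for _ in range(n)] for _ in range(n)]
--     for i in range(n):
--         for j in range(n):
--             for k in range(n):
--                 c[i][j] += a[i][k] * b[k][j]
--             c[i][j] %= 1000000007
--     return c
--
-- def squared(A, n):
--     if n == 1:
--         return A
--
--     tmp = squared(A, n // 2)
--     if n % 2 == 0:
--         return multiply(tmp, tmp)
--     else:
--         return multiply(multiply(tmp, tmp), A)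
-- ===== SOURCE B (Python) =====
-- def multiply(a, b):
--     n = len(a)
--     c = [[0 for _ in range(n)] for _ in range(n)]
--     for i in range(n):
--         for j in range(n):
--             for k in range(n):
--                 c[i][j] += a[i][k] * b[k][j]
--             c[i][j] %= 1000000007
--     return c
--
-- def squared(A, n):
--     # iterative MSB-first binary exponentiation; same multiply sequence as the recursion
--     bits = []
--     m = n
--     while m > 1:
--         bits.append(m % 2)
--         m //= 2
--     result = A
--     for bit in reversed(bits):
--         result = multiply(result, result)
--         if bit:
--             result = multiply(result, A)
--     return result
-- ===== Notes on version B (the rewrite author's own statement) =====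
-- stated objective: alternative
-- what changed: Replaced the top-down recursive halving with an iterative MSB-first binary-exponentiation loop over the bits of n, keeping the same multiply helper and operand order.
import Mathlib
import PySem

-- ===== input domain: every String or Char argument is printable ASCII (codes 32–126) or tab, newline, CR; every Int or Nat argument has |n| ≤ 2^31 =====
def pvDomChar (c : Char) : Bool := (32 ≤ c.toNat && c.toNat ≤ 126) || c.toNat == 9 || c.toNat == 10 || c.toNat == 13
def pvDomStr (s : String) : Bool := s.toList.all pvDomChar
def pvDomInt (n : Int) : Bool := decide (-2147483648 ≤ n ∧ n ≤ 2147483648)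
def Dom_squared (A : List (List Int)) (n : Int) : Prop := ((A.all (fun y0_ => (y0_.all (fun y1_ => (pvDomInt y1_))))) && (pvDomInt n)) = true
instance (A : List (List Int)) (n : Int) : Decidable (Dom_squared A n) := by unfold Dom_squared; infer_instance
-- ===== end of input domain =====

-- B replaces the recursive halving of A with an iterative MSB-first binary-exponentiation
-- loop over the bits of n (same multiply helper, same operand order); alternative decomposition.


-- ===== PORT A =====
-- shared helper: both Pythons contain the identical `multiply` (triple loop, mod 1e9+7).
-- indexing uses getD; Pre_squared guarantees every access is in range, so this is exact there.
def pymul (a b : List (List Int)) : List (List Int) :=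
  let n := a.length
  (List.range n).map (fun i =>
    (List.range n).map (fun j =>
      PySem.Int.mod
        ((List.range n).foldl
          (fun acc k => acc + ((a.getD i []).getD k 0) * ((b.getD k []).getD j 0)) 0)
        1000000007))

def squared (A : List (List Int)) (n : Int) : List (List Int) :=
  if n = 1 then A
  else if n ≤ 0 then A   -- Python recurses forever here (RecursionError); excluded by Pre_squared
  else
    let tmp := squared A (PySem.Int.floordiv n 2)
    if PySem.Int.mod n 2 = 0 then pymul tmp tmp
    else pymul (pymul tmp tmp) A
termination_by n.toNat
decreasing_by
  have h2 : (2:Int) ≤ n := by omega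
  rw [PySem.Int.floordiv_eq_ediv_of_pos (by omega)]
  omega

-- ===== PORT B =====
-- bits of m collected LSB-first while m > 1 (the leading 1 bit is dropped, as in Source B)
def bitsB (m : Nat) : List Bool :=
  if m ≤ 1 then [] else (m % 2 = 1) :: bitsB (m / 2)

def squared_alt (A : List (List Int)) (n : Int) : List (List Int) :=
  ((bitsB n.toNat).reverse).foldl
    (fun r b => let r2 := pymul r r; if b then pymul r2 A else r2) A

-- ===== PRECONDITION & SPEC =====
-- Pre_ excludes exactly the inputs where Python A raises: n ≤ 0 (RecursionError), and, for
-- n ≥ 2, a matrix with some row shorter than the number of rows (IndexError in multiply).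
def Pre_squared (A : List (List Int)) (n : Int) : Prop :=
  1 ≤ n ∧ (n = 1 ∨ ∀ row ∈ A, A.length ≤ row.length)
instance (A : List (List Int)) (n : Int) : Decidable (Pre_squared A n) := by
  unfold Pre_squared; infer_instance
def pvWitness_squared : List (List Int) × Int := ([[1, 1], [1, 0]], 10)

def Spec_squared (A : List (List Int)) (n : Int) (out : List (List Int)) : Prop := out = squared_alt A n
instance (A : List (List Int)) (n : Int) (out : List (List Int)) : Decidable (Spec_squared A n out) := by unfold Spec_squared; infer_instance

-- ===== CLAIM (what is proved, stated in full; the proofs are below) =====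
def Claim_equal_squared : Prop := ∀ (A : List (List Int)) (n : Int), Dom_squared A n → Pre_squared A n → Spec_squared A n (squared A n)

-- ===== LEMMAS AND PROOFS =====

-- the loop body of B's fold
def stepB (A r : List (List Int)) (b : Bool) : List (List Int) :=
  let r2 := pymul r r; if b then pymul r2 A else r2

theorem squared_alt_as_fold (A : List (List Int)) (n : Int) :
    squared_alt A n = ((bitsB n.toNat).reverse).foldl (stepB A) A := by
  rfl

theorem bitsB_of_gt_one {m : Nat} (h : 1 < m) :
    bitsB m = (decide (m % 2 = 1)) :: bitsB (m / 2) := by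
  rw [bitsB]
  simp [Nat.not_le.mpr h]

theorem key (k : Nat) : ∀ (A : List (List Int)) (n : Int), n.toNat ≤ k →
    squared A n = squared_alt A n := by
  induction k with
  | zero =>
    intro A n h
    have hn : n ≤ 0 := by omega
    rw [squared, squared_alt]
    have h0 : n.toNat = 0 := by omega
    rw [h0]
    have hb : bitsB 0 = [] := by rw [bitsB]; rfl
    rw [hb]
    simp [hn, show n ≠ 1 by omega]
  | succ k ih =>
    intro A n h
    by_cases h1 : n = 1
    · subst h1
      rw [squared, squared_alt]
      have : bitsB (1:Int).toNat = [] := by rw [bitsB]; rfl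
      rw [this]
      simp
    · by_cases h0 : n ≤ 0
      · rw [squared, squared_alt]
        have : n.toNat = 0 := by omega
        rw [this]
        have hb : bitsB 0 = [] := by rw [bitsB]; rfl
        rw [hb]
        simp [h0, h1]
      · -- n ≥ 2
        have h2 : (2:Int) ≤ n := by omega
        have hm : 1 < n.toNat := by omega
        have hfd : PySem.Int.floordiv n 2 = n / 2 :=
          PySem.Int.floordiv_eq_ediv_of_pos (by omega)
        have hmd : PySem.Int.mod n 2 = n % 2 :=
          PySem.Int.mod_eq_emod_of_pos (by omega)
        have htn : (n / 2).toNat = n.toNat / 2 := by omega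
        have hle : (n / 2).toNat ≤ k := by omega
        have htmp : squared A (PySem.Int.floordiv n 2)
            = squared_alt A (PySem.Int.floordiv n 2) := by
          apply ih
          rw [hfd]; omega
        rw [squared]
        simp only [h1, h0, if_false, hfd, hmd] at htmp ⊢
        rw [htmp]
        rw [squared_alt_as_fold A n, bitsB_of_gt_one hm, List.reverse_cons,
          List.foldl_append, squared_alt_as_fold A (n / 2), htn]
        simp only [List.foldl_cons, List.foldl_nil, stepB]
        have hpar : n % 2 = ((n.toNat % 2 : Nat) : Int) := by omega
        rcases Nat.mod_two_eq_zero_or_one n.toNat with hp | hp <;>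
          simp [hpar, hp]

theorem squared_eq_alt (A : List (List Int)) (n : Int) : squared A n = squared_alt A n :=
  key n.toNat A n le_rfl

-- ===== VERDICT (by name: the statement is the Claim_ definition above) =====
theorem squared_spec : Claim_equal_squared := by
  intro A n _ _
  unfold Spec_squared
  exact squared_eq_alt A n
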